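/- GENERATED by farm/mkstatement.py from design/units.tsv (unit `setup_free`) and the Specs of Vorbis/Spec/*.lean — do not edit.
   THE STATEMENT of the proof unit `setup_free`: the function `setup_free` (16 instructions) satisfies its contract,
   given the contracts of its callees. What the names mean: Vorbis/Spec/Basic.lean. The theorem to prove:
   `theorem setup_free_ok : Vorbis.Spec.setup_free.Statement`. -/
import Vorbis.Spec.Alloc
import Vorbis.Spec.LibcMisc
namespace Vorbis.Spec.setup_free
open X86 X86.User Asan

/-- The statement of unit `setup_free`. -/
def Statement : Prop :=
  ∀ (Lay : Layout) (_hLay : Lay.hi = 0x1000000) (μ : Microarch) (_hμ : UserX.MicroOK μ) (u₀ : State)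
    (_hcode : HasCodeNat Lay u₀ Vorbis.L.setup_free.entry Vorbis.Code.code_setup_free.nat Vorbis.L.setup_free.size)
    (_h_asan_load8_noabort : Asan.SmallCheck Lay μ Vorbis.WayInv (Vorbis.CodeOK u₀) [.rax, .rcx, .rdx] 8 Vorbis.L.__asan_load8_noabort.entry)
    (_h_free : ∀ (others : List Obj) (frames : List (Nat × FrameLayout)), Calls Lay μ Vorbis.WayInv (Vorbis.conv u₀) Vorbis.L.free.entry (Vorbis.Spec.free.spec others frames)),
    ∀ (others : List Obj) (frames : List (Nat × FrameLayout)), Calls Lay μ Vorbis.WayInv (Vorbis.conv u₀) Vorbis.L.setup_free.entry (Vorbis.Spec.setup_free.spec others frames)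

end Vorbis.Spec.setup_free
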